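-- pv_equiv track=rewrite | github.com/pypi-data/pypi-mirror-208 | packages/ib110hw/ib110hw-0.1.7.tar.gz/ib110hw-0.1.7/src/ib110hw/turing/_helpers.py | validate_dtm_configuration
-- ===== SOURCE A (Python) =====
-- from typing import IO, List, Tuple, Set, Optional, Callable
-- from itertools import takewhile, dropwhile
--
-- def validate_dtm_configuration(definition: List[str]) -> Optional[str]:
--     if all(l.strip() != "---" for l in definition):
--         return "The divider is missing."
--
--     config = list(takewhile(lambda l: l != "---", definition))
--
--     if not any((l.startswith("init") for l in config)):
--         return "Specifying the initial state is mandatory."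
--
--     init_line = next((l for l in config if l.startswith("init")), None)
--     if init_line and len(init_line.split()) != 2:
--         return "Invalid initial state."
--
--     acc_line = next((l for l in config if l.startswith("acc")), None)
--     if acc_line and len(acc_line.split()) != 2:
--         return "Invalid accepting state."
--
--     rej_line = next((l for l in config if l.startswith("rej")), None)
--     if rej_line and len(rej_line.split()) != 2:
--         return "Invalid rejecting state."
--
--     alphabet_line = next((l for l in config if l.startswith("alphabet")), None)
--     if not alphabet_line:
--         return "The alphabet definition is missing."
--
--     if len(alphabet_line.split()) < 2 or any(len(s) > 1 for s in alphabet_line.split()[1:]):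
--         return "Invalid alphabet."
-- ===== SOURCE B (Python) =====
-- from typing import List, Optional
--
--
-- def validate_dtm_configuration(definition: List[str]) -> Optional[str]:
--     # One pass: record the first line per prefix (only before the exact "---"
--     # cutoff) and whether any stripped "---" divider exists; then judge.
--     has_divider = False
--     collecting = True
--     init_line = acc_line = rej_line = alphabet_line = None
--     for l in definition:
--         if l.strip() == "---":
--             has_divider = True
--         if collecting:
--             if l == "---":
--                 collecting = False
--             else:
--                 if init_line is None and l.startswith("init"):
--                     init_line = l
--                 if acc_line is None and l.startswith("acc"):
--                     acc_line = l
--                 if rej_line is None and l.startswith("rej"):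
--                     rej_line = l
--                 if alphabet_line is None and l.startswith("alphabet"):
--                     alphabet_line = l
--
--     if not has_divider:
--         return "The divider is missing."
--     if init_line is None:
--         return "Specifying the initial state is mandatory."
--     if len(init_line.split()) != 2:
--         return "Invalid initial state."
--     if acc_line is not None and len(acc_line.split()) != 2:
--         return "Invalid accepting state."
--     if rej_line is not None and len(rej_line.split()) != 2:
--         return "Invalid rejecting state."
--     if alphabet_line is None:
--         return "The alphabet definition is missing."
--     parts = alphabet_line.split()
--     if len(parts) < 2 or any(len(s) > 1 for s in parts[1:]):
--         return "Invalid alphabet."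
--     return None
-- ===== Notes on version B (the rewrite author's own statement) =====
-- stated objective: simpler
-- what changed: Replaces A's six separate scans (all, takewhile, any, and four next/generator scans) by a single pass that records the first line per prefix and a divider flag, followed by straight-line checks on that table.
import Mathlib
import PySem

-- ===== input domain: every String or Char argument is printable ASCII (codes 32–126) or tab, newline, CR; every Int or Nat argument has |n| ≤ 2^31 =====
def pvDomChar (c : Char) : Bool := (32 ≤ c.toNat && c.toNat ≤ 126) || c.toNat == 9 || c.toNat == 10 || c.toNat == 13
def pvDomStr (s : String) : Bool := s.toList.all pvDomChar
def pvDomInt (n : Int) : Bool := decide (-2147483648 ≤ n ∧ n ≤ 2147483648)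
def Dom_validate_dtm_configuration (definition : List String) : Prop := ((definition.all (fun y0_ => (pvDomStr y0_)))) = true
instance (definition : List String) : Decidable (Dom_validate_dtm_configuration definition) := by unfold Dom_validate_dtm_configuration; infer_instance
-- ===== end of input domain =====

-- B replaces A's six separate scans by one pass recording the first line per
-- prefix and a divider flag, then straight-line checks (objective: simpler).

-- ===== PORT A =====

-- `line and len(line.split()) != 2` (Python truthiness: empty string is falsy)
def pyBadState (o : Option String) : Bool :=
  match o with
  | some l => !(l == "") && !((PySem.Str.split₀ l).length == 2)
  | none => false

def validate_dtm_configuration (definition : List String) : Option String :=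
  if definition.all (fun l => !(PySem.Str.strip l == "---")) then
    some "The divider is missing."
  else
    let config := definition.takeWhile (fun l => !(l == "---"))
    if !(config.any (fun l => PySem.Str.startswith l "init")) then
      some "Specifying the initial state is mandatory."
    else if pyBadState (config.find? (fun l => PySem.Str.startswith l "init")) then
      some "Invalid initial state."
    else if pyBadState (config.find? (fun l => PySem.Str.startswith l "acc")) then
      some "Invalid accepting state."
    else if pyBadState (config.find? (fun l => PySem.Str.startswith l "rej")) then
      some "Invalid rejecting state."
    else
      match config.find? (fun l => PySem.Str.startswith l "alphabet") with
      | none => some "The alphabet definition is missing."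
      | some al =>
        if al == "" then some "The alphabet definition is missing."  -- `if not alphabet_line` truthiness
        else if decide ((PySem.Str.split₀ al).length < 2)
                || ((PySem.Str.split₀ al).drop 1).any (fun s => decide (PySem.Str.len s > 1)) then
          some "Invalid alphabet."
        else none

-- ===== PORT B =====

-- keep the first recorded line for a prefix, else record `l` if it matches
def updFirst (o : Option String) (p l : String) : Option String :=
  if o.isNone && PySem.Str.startswith l p then some l else o

-- the single pass of Source B: divider flag, collecting flag, four first-line slots
def bLoop : List String → Bool → Bool → Option String → Option String → Option String → Option String →
    Bool × Option String × Option String × Option String × Option String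
  | [], hd, _, i, a, r, al => (hd, i, a, r, al)
  | l :: ls, hd, col, i, a, r, al =>
    let hd' := hd || (PySem.Str.strip l == "---")
    if col then
      if l == "---" then bLoop ls hd' false i a r al
      else bLoop ls hd' true (updFirst i "init" l) (updFirst a "acc" l)
             (updFirst r "rej" l) (updFirst al "alphabet" l)
    else bLoop ls hd' false i a r al

def validate_dtm_configuration_alt (definition : List String) : Option String :=
  match bLoop definition false true none none none none with
  | (hd, i, a, r, al) =>
    if !hd then some "The divider is missing."
    else
      match i with
      | none => some "Specifying the initial state is mandatory."
      | some il =>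
        if !((PySem.Str.split₀ il).length == 2) then some "Invalid initial state."
        else if (match a with
                 | some l => !((PySem.Str.split₀ l).length == 2)
                 | none => false) then some "Invalid accepting state."
        else if (match r with
                 | some l => !((PySem.Str.split₀ l).length == 2)
                 | none => false) then some "Invalid rejecting state."
        else
          match al with
          | none => some "The alphabet definition is missing."
          | some alb =>
            if decide ((PySem.Str.split₀ alb).length < 2)
              || ((PySem.Str.split₀ alb).drop 1).any (fun s => decide (PySem.Str.len s > 1)) then
              some "Invalid alphabet."
            else none

-- ===== PRECONDITION & SPEC =====
def Spec_validate_dtm_configuration (definition : List String) (out : Option String) : Prop := out = validate_dtm_configuration_alt definition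
instance (definition : List String) (out : Option String) : Decidable (Spec_validate_dtm_configuration definition out) := by unfold Spec_validate_dtm_configuration; infer_instance

-- ===== CLAIM (what is proved, stated in full; the proofs are below) =====
def Claim_equal_validate_dtm_configuration : Prop := ∀ (definition : List String), Dom_validate_dtm_configuration definition → Spec_validate_dtm_configuration definition (validate_dtm_configuration definition)

-- ===== LEMMAS AND PROOFS =====

theorem bLoop_false (ls : List String) (hd : Bool) (i a r al : Option String) :
    bLoop ls hd false i a r al =
      (hd || ls.any (fun l => PySem.Str.strip l == "---"), i, a, r, al) := by
  induction ls generalizing hd with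
  | nil => simp [bLoop]
  | cons l ls ih => simp [bLoop, ih, Bool.or_assoc]

theorem updFirst_orElse (o : Option String) (p l : String) (t : Option String) :
    (updFirst o p l).or t =
      o.or (if PySem.Str.startswith l p then some l else t) := by
  cases o <;> simp [updFirst] <;> split <;> simp

theorem bLoop_true (ls : List String) (hd : Bool) (i a r al : Option String) :
    bLoop ls hd true i a r al =
      (hd || ls.any (fun l => PySem.Str.strip l == "---"),
       i.or ((ls.takeWhile (fun l => !(l == "---"))).find? (fun l => PySem.Str.startswith l "init")),
       a.or ((ls.takeWhile (fun l => !(l == "---"))).find? (fun l => PySem.Str.startswith l "acc")),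
       r.or ((ls.takeWhile (fun l => !(l == "---"))).find? (fun l => PySem.Str.startswith l "rej")),
       al.or ((ls.takeWhile (fun l => !(l == "---"))).find? (fun l => PySem.Str.startswith l "alphabet"))) := by
  induction ls generalizing hd i a r al with
  | nil => simp [bLoop]
  | cons l ls ih =>
    by_cases hl : l = "---"
    · subst hl
      have hstrip : (PySem.Str.strip "---" == "---") = true := by decide
      simp [bLoop, bLoop_false, hstrip, List.takeWhile]
    · have hne : (l == "---") = false := by simpa using hl
      simp only [bLoop, hne, Bool.not_false, if_true, ih,
        List.takeWhile_cons, List.any_cons, List.find?]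
      simp only [Bool.false_eq_true, if_false, Prod.mk.injEq]
      refine ⟨by simp [Bool.or_assoc], ?_, ?_, ?_, ?_⟩ <;>
        rw [updFirst_orElse] <;> split <;> simp_all

theorem any_eq_isSome_find? (p : String → Bool) (ls : List String) :
    ls.any p = (ls.find? p).isSome := by
  induction ls with
  | nil => simp
  | cons l ls ih => by_cases h : p l <;> simp [List.find?, h, ih]

theorem startswith_ne_empty (l p : String) (hp : PySem.Str.startswith "" p = false)
    (h : PySem.Str.startswith l p = true) : (l == "") = false := by
  by_cases he : l = ""
  · subst he; rw [hp] at h; exact absurd h (by simp)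
  · simpa using he

theorem validate_dtm_configuration_eq (definition : List String) :
    validate_dtm_configuration definition = validate_dtm_configuration_alt definition := by
  unfold validate_dtm_configuration validate_dtm_configuration_alt
  rw [bLoop_true]
  simp only [Option.none_or]
  set config := definition.takeWhile (fun l => !(l == "---")) with hcfg
  have hall : definition.all (fun l => !(PySem.Str.strip l == "---"))
      = !(definition.any (fun l => PySem.Str.strip l == "---")) := by
    induction definition with
    | nil => simp
    | cons l ls ih => simp [ih]
  rw [hall]
  cases hdiv : definition.any (fun l => PySem.Str.strip l == "---") with
  | false => simp
  | true =>
    simp only [Bool.false_or, Bool.not_true, Bool.false_eq_true, if_false]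
    rw [any_eq_isSome_find? (fun l => PySem.Str.startswith l "init") config]
    cases hinit : config.find? (fun l => PySem.Str.startswith l "init") with
    | none => simp
    | some il =>
      have hil : (il == "") = false :=
        startswith_ne_empty il "init" (by decide) (by simpa using List.find?_some hinit)
      simp only [Option.isSome_some, Bool.not_true, Bool.false_eq_true, if_false]
      have hinitbad : pyBadState (some il) = !((PySem.Str.split₀ il).length == 2) := by
        simp [pyBadState, hil]
      rw [hinitbad]
      cases hbad : !((PySem.Str.split₀ il).length == 2) with
      | true => simp
      | false =>
        simp only [Bool.false_eq_true, if_false]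
        have hacc : pyBadState (config.find? (fun l => PySem.Str.startswith l "acc"))
            = (match config.find? (fun l => PySem.Str.startswith l "acc") with
               | some l => !((PySem.Str.split₀ l).length == 2)
               | none => false) := by
          cases h : config.find? (fun l => PySem.Str.startswith l "acc") with
          | none => rfl
          | some x =>
            simp [pyBadState, startswith_ne_empty x "acc" (by decide) (by simpa using List.find?_some h)]
        have hrej : pyBadState (config.find? (fun l => PySem.Str.startswith l "rej"))
            = (match config.find? (fun l => PySem.Str.startswith l "rej") with
               | some l => !((PySem.Str.split₀ l).length == 2)
               | none => false) := by
          cases h : config.find? (fun l => PySem.Str.startswith l "rej") with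
          | none => rfl
          | some x =>
            simp [pyBadState, startswith_ne_empty x "rej" (by decide) (by simpa using List.find?_some h)]
        rw [hacc, hrej]
        refine if_congr Iff.rfl rfl (if_congr Iff.rfl rfl ?_)
        cases halb : config.find? (fun l => PySem.Str.startswith l "alphabet") with
        | none => rfl
        | some alb =>
          have : (alb == "") = false :=
            startswith_ne_empty alb "alphabet" (by decide) (by simpa using List.find?_some halb)
          simp [this]

-- ===== VERDICT (by name: the statement is the Claim_ definition above) =====
theorem validate_dtm_configuration_spec : Claim_equal_validate_dtm_configuration := by
  intro definition _
  unfold Spec_validate_dtm_configuration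
  exact validate_dtm_configuration_eq definition
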